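-- pv_equiv track=rewrite | github.com/i-dubits/ya_training | Train_2.0/Lecture_1/E. Точка и треугольник.py | closest_vertice
-- ===== SOURCE A (Python) =====
-- def closest_vertice(x, y, d):
--
--     ver_to_dist = {}
--
--     dist_A_sq = x**2 + y**2
--     dist_B_sq = (x - d)**2 + y**2
--     dist_C_sq = x**2 + (y - d)**2
--
--     ver_to_dist[1] = dist_A_sq
--     ver_to_dist[2] = dist_B_sq
--     ver_to_dist[3] = dist_C_sq
--
--     min_dist = min((dist_A_sq, dist_B_sq, dist_C_sq))
--
--     final_list = []
--     for ver_index, dist in ver_to_dist.items():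
--         if dist == min_dist:
--             final_list.append(ver_index)
--
--     if len(final_list) == 1:
--         return final_list[0]
--     else:
--         # We cannot have more than 2 elements in dict
--         return min(final_list[0], final_list[1])
-- ===== SOURCE B (Python) =====
-- def closest_vertice(x, y, d):
--     dist_A_sq = x**2 + y**2
--     dist_B_sq = (x - d)**2 + y**2
--     dist_C_sq = x**2 + (y - d)**2
--     if dist_A_sq <= dist_B_sq and dist_A_sq <= dist_C_sq:
--         return 1
--     elif dist_B_sq <= dist_C_sq:
--         return 2
--     else:
--         return 3
-- ===== Notes on version B (the rewrite author's own statement) =====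
-- stated objective: simpler
-- what changed: Replaced the dict, min over a tuple, the tie-collecting loop and the len-based special case with a direct if/elif/else comparison chain whose <= comparisons realize the same smallest-index tie-break.
import Mathlib
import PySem

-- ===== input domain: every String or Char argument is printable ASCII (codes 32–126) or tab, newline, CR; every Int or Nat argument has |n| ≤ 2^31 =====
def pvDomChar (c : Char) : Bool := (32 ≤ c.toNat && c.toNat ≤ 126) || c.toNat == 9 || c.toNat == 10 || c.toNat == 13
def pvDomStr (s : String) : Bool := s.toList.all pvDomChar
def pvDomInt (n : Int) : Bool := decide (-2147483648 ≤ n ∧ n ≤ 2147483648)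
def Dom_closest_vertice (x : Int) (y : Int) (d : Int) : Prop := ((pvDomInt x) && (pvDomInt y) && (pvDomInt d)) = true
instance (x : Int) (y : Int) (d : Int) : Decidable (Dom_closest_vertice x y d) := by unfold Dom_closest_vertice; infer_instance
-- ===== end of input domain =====

-- B replaces A's dict, tie-collecting loop and len-based special case by a direct
-- if/elif/else comparison chain with the same smallest-index tie-break (objective: simpler).

-- ===== PORT A =====
def closest_vertice (x : Int) (y : Int) (d : Int) : Int :=
  let dist_A_sq := x ^ 2 + y ^ 2
  let dist_B_sq := (x - d) ^ 2 + y ^ 2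
  let dist_C_sq := x ^ 2 + (y - d) ^ 2
  let ver_to_dist : PySem.Dict Int Int :=
    (((PySem.Dict.empty).insert 1 dist_A_sq).insert 2 dist_B_sq).insert 3 dist_C_sq
  let min_dist := min dist_A_sq (min dist_B_sq dist_C_sq)
  let final_list := ver_to_dist.items.foldl
    (fun acc p => if p.2 = min_dist then acc ++ [p.1] else acc) ([] : List Int)
  if final_list.length = 1 then
    (PySem.List.pyGet? final_list 0).getD 0   -- index 0 of a nonempty list; the default is never taken
  else
    min ((PySem.List.pyGet? final_list 0).getD 0) ((PySem.List.pyGet? final_list 1).getD 0)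

-- ===== PORT B =====
def closest_vertice_alt (x : Int) (y : Int) (d : Int) : Int :=
  let dist_A_sq := x ^ 2 + y ^ 2
  let dist_B_sq := (x - d) ^ 2 + y ^ 2
  let dist_C_sq := x ^ 2 + (y - d) ^ 2
  if dist_A_sq ≤ dist_B_sq ∧ dist_A_sq ≤ dist_C_sq then 1
  else if dist_B_sq ≤ dist_C_sq then 2
  else 3

-- ===== PRECONDITION & SPEC =====
def Spec_closest_vertice (x : Int) (y : Int) (d : Int) (out : Int) : Prop := out = closest_vertice_alt x y d
instance (x : Int) (y : Int) (d : Int) (out : Int) : Decidable (Spec_closest_vertice x y d out) := by unfold Spec_closest_vertice; infer_instance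

-- ===== CLAIM (what is proved, stated in full; the proofs are below) =====
def Claim_equal_closest_vertice : Prop := ∀ (x : Int) (y : Int) (d : Int), Dom_closest_vertice x y d → Spec_closest_vertice x y d (closest_vertice x y d)

-- ===== LEMMAS AND PROOFS =====

-- the value A computes, as a function of the three squared distances (A's dict reduces to this by rfl)
def pvSelect (dA dB dC : Int) : Int :=
  let m := min dA (min dB dC)
  let fl := [(1, dA), (2, dB), (3, dC)].foldl
    (fun acc (p : Int × Int) => if p.2 = m then acc ++ [p.1] else acc) ([] : List Int)
  if fl.length = 1 then (PySem.List.pyGet? fl 0).getD 0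
  else min ((PySem.List.pyGet? fl 0).getD 0) ((PySem.List.pyGet? fl 1).getD 0)

set_option maxHeartbeats 1000000 in
lemma pvSelect_eq (a b c : Int) :
    pvSelect a b c = if a ≤ b ∧ a ≤ c then 1 else if b ≤ c then 2 else 3 := by
  unfold pvSelect
  simp only [List.foldl, List.nil_append]
  rcases le_total a b with h1 | h1 <;> rcases le_total a c with h2 | h2 <;>
    rcases le_total b c with h3 | h3 <;>
    rw [min_def, min_def] <;> split_ifs <;>
    simp_all [PySem.List.pyGet?, PySem.List.pyIdx?] <;> omega

-- ===== VERDICT (by name: the statement is the Claim_ definition above) =====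
theorem closest_vertice_spec : Claim_equal_closest_vertice := by
  intro x y d _
  show closest_vertice x y d = closest_vertice_alt x y d
  have h : closest_vertice x y d
      = pvSelect (x ^ 2 + y ^ 2) ((x - d) ^ 2 + y ^ 2) (x ^ 2 + (y - d) ^ 2) := rfl
  rw [h, pvSelect_eq]
  rfl
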